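-- pv_equiv track=rewrite | github.com/xubintao/OBE-and-DGO | mask_rcnn/postprocessing.py | new_section_centers_generator
-- ===== SOURCE A (Python) =====
-- def find_closest_value(lst, a):
--     closest = None
--     min_distance = float('inf')
--
--     for num in lst:
--         distance = abs(num - a)
--         if distance < min_distance:
--             closest = num
--             min_distance = distance
--
--     return closest
--
-- def new_section_centers_generator(full_centers,new_centers,epsilon):
--         old_centers=full_centers[len(new_centers):]
--         new_section_centers=[]
--
--         for new_center in new_centers:
--             # 找到离平均框最近的原始框
--             closest=find_closest_value(old_centers, new_center)
--             # 如果有原始框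
--             if closest:
--                 # 若最近框在1/2最大框之内，则被选中，否则选择平均框
--                 if abs(closest-new_center) < epsilon:
--                     new_section_centers.append(closest)
--                 else:
--                     new_section_centers.append(new_center)
--             else:
--                 new_section_centers.append(new_center)
--         return new_section_centers
-- ===== SOURCE B (Python) =====
-- def _sorted_keys(old):
--     # distinct old centers, ascending
--     return sorted(set(old))
--
-- def _nearest(keys, old, a):
--     # binary search: leftmost index lo with keys[lo] >= a
--     n = len(keys)
--     lo, hi = 0, n
--     while lo < hi:
--         mid = (lo + hi) // 2
--         if keys[mid] < a:
--             lo = mid + 1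
--         else:
--             hi = mid
--     if lo == 0:
--         return keys[0]
--     if lo == n:
--         return keys[n - 1]
--     v, u = keys[lo - 1], keys[lo]
--     if a - v < u - a:
--         return v
--     if u - a < a - v:
--         return u
--     # exact tie: keep the value occurring first in old (the scan order of A)
--     return v if old.index(v) < old.index(u) else u
--
-- def new_section_centers_generator(full_centers, new_centers, epsilon):
--     old = full_centers[len(new_centers):]
--     keys = _sorted_keys(old)
--     out = []
--     for a in new_centers:
--         if len(keys) == 0:
--             out.append(a)
--         else:
--             c = _nearest(keys, old, a)
--             if abs(c - a) < epsilon: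
--                 out.append(c)
--             else:
--                 out.append(a)
--     return out
-- ===== Notes on version B (the rewrite author's own statement) =====
-- stated objective: faster
-- what changed: B replaces A's per-query linear scan over the old centers with a sorted list of distinct old centers queried by binary search (ties between the two neighbours resolved by first occurrence in the old list), and fixes A's 'if closest:' truthiness slip that discards a nearest old center equal to 0.
-- intended difference: On inputs where some new center a != 0 has nearest old center exactly 0 with |a| < epsilon, A returns a (its 'if closest:' treats the int 0 as false and skips the snap), while B returns 0, the nearest-within-epsilon old center the function is meant to select. — e.g. on new_section_centers_generator([5, 0], [1], 2): A returns [1], B returns [0]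
import Mathlib
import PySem

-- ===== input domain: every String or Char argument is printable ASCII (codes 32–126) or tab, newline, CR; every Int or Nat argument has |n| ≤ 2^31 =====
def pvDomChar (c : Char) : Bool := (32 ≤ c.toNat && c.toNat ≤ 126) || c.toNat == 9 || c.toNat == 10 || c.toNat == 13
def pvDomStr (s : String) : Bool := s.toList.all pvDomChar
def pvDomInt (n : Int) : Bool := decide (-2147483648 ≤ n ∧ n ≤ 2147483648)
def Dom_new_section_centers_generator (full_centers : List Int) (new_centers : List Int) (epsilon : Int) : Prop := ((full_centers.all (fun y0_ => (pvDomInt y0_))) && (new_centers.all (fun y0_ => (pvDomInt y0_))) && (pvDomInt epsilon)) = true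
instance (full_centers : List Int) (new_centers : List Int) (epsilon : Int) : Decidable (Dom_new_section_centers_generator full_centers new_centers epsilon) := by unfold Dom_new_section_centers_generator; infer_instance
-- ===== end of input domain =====

-- B replaces A's per-query linear scan with binary search on the sorted distinct old
-- centers (objective: faster), and fixes A's `if closest:` truthiness slip on a nearest
-- old center equal to 0 (stated as the intended difference D_ below).

-- ===== PORT A =====
def find_closest_value (lst : List Int) (a : Int) : Option Int :=
  -- closest = None; min_distance = inf  ~  (none, none); the scan updates on strict <
  (lst.foldl
    (fun (st : Option Int × Option Int) num =>
      let distance := |num - a|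
      match st.2 with
      | none => (some num, some distance)
      | some md => if distance < md then (some num, some distance) else st)
    (none, none)).1

def new_section_centers_generator (full_centers : List Int) (new_centers : List Int) (epsilon : Int) : List Int :=
  let old_centers := PySem.List.slice full_centers (some (new_centers.length : Int)) none
  new_centers.foldl
    (fun acc new_center =>
      match find_closest_value old_centers new_center with
      | some closest =>
          -- Python `if closest:`: a Some is truthy iff the int is ≠ 0
          if closest ≠ 0 then
            if |closest - new_center| < epsilon then acc ++ [closest] else acc ++ [new_center]
          else acc ++ [new_center]
      | none => acc ++ [new_center]) []

-- ===== PORT B =====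
def sortedKeys (old : List Int) : List Int :=
  -- sorted(set(old))
  PySem.List.sorted (PySem.Set.ofList old) (fun x => x) false

-- the while-loop of _nearest; lo, hi stay in 0..len(keys), so Nat and (lo+hi)//2 = Nat
-- division; the interval shrinks every pass, so fuel = hi - lo steps are exactly enough
def bsearchGo (keys : List Int) (a : Int) : Nat → Nat → Nat → Nat
  | 0, lo, _ => lo
  | n + 1, lo, hi =>
    if lo < hi then
      let mid := (lo + hi) / 2
      if keys.getD mid 0 < a then bsearchGo keys a n (mid + 1) hi
      else bsearchGo keys a n lo mid
    else lo

def bsearchLoop (keys : List Int) (a : Int) (lo hi : Nat) : Nat :=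
  bsearchGo keys a (hi - lo) lo hi

def nearest (keys : List Int) (old : List Int) (a : Int) : Int :=
  let n := keys.length
  let lo := bsearchLoop keys a 0 n
  if lo = 0 then keys.getD 0 0
  else if lo = n then keys.getD (n - 1) 0
  else
    let v := keys.getD (lo - 1) 0
    let u := keys.getD lo 0
    if a - v < u - a then v
    else if u - a < a - v then u
    else
      -- old.index never raises here: v and u are elements of old, so getD 0 is exact
      if (PySem.List.index? old v).getD 0 < (PySem.List.index? old u).getD 0 then v else u

def new_section_centers_generator_alt (full_centers : List Int) (new_centers : List Int) (epsilon : Int) : List Int :=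
  let old := PySem.List.slice full_centers (some (new_centers.length : Int)) none
  let keys := sortedKeys old
  new_centers.foldl
    (fun out a =>
      if keys.length = 0 then out ++ [a]
      else
        let c := nearest keys old a
        if |c - a| < epsilon then out ++ [c] else out ++ [a]) []

-- ===== PRECONDITION & SPEC =====
-- On inputs where some new center a ≠ 0 has nearest old center exactly 0 with |a| < epsilon,
-- A returns a (its `if closest:` treats the int 0 as false and skips the snap), while B
-- returns 0, the nearest-within-epsilon old center the function is meant to select.
def D_new_section_centers_generator (full_centers : List Int) (new_centers : List Int) (epsilon : Int) : Prop :=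
  ∃ a ∈ new_centers, a ≠ 0 ∧ |a| < epsilon ∧ (0 : Int) ∈ full_centers.drop new_centers.length ∧
    (∀ v ∈ full_centers.drop new_centers.length, |a| ≤ |v - a|) ∧
    (2 * a ∈ full_centers.drop new_centers.length →
      (full_centers.drop new_centers.length).idxOf (0 : Int) < (full_centers.drop new_centers.length).idxOf (2 * a))
instance (full_centers : List Int) (new_centers : List Int) (epsilon : Int) : Decidable (D_new_section_centers_generator full_centers new_centers epsilon) := by unfold D_new_section_centers_generator; infer_instance

def Spec_new_section_centers_generator (full_centers : List Int) (new_centers : List Int) (epsilon : Int) (out : List Int) : Prop := ¬ D_new_section_centers_generator full_centers new_centers epsilon → out = new_section_centers_generator_alt full_centers new_centers epsilon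
instance (full_centers : List Int) (new_centers : List Int) (epsilon : Int) (out : List Int) : Decidable (Spec_new_section_centers_generator full_centers new_centers epsilon out) := by unfold Spec_new_section_centers_generator; infer_instance

def pvDiffWitness_new_section_centers_generator : List Int × List Int × Int := ([5, 0], [1], 2)
def pvDiffWitnessOut_new_section_centers_generator : (List Int) × (List Int) := ([1], [0])

-- ===== CLAIM (what is proved, stated in full; the proofs are below) =====
def Claim_unchanged_new_section_centers_generator : Prop := ∀ (full_centers : List Int) (new_centers : List Int) (epsilon : Int), Dom_new_section_centers_generator full_centers new_centers epsilon → Spec_new_section_centers_generator full_centers new_centers epsilon (new_section_centers_generator full_centers new_centers epsilon)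
def Claim_changed_new_section_centers_generator : Prop := Dom_new_section_centers_generator (pvDiffWitness_new_section_centers_generator.1) (pvDiffWitness_new_section_centers_generator.2.1) (pvDiffWitness_new_section_centers_generator.2.2) ∧ D_new_section_centers_generator (pvDiffWitness_new_section_centers_generator.1) (pvDiffWitness_new_section_centers_generator.2.1) (pvDiffWitness_new_section_centers_generator.2.2) ∧ new_section_centers_generator (pvDiffWitness_new_section_centers_generator.1) (pvDiffWitness_new_section_centers_generator.2.1) (pvDiffWitness_new_section_centers_generator.2.2) = pvDiffWitnessOut_new_section_centers_generator.1 ∧ new_section_centers_generator_alt (pvDiffWitness_new_section_centers_generator.1) (pvDiffWitness_new_section_centers_generator.2.1) (pvDiffWitness_new_section_centers_generator.2.2) = pvDiffWitnessOut_new_section_centers_generator.2 ∧ pvDiffWitnessOut_new_section_centers_generator.1 ≠ pvDiffWitnessOut_new_section_centers_generator.2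
def Claim_exact_new_section_centers_generator : Prop := ∀ (full_centers : List Int) (new_centers : List Int) (epsilon : Int), Dom_new_section_centers_generator full_centers new_centers epsilon → D_new_section_centers_generator full_centers new_centers epsilon → new_section_centers_generator full_centers new_centers epsilon ≠ new_section_centers_generator_alt full_centers new_centers epsilon

-- ===== LEMMAS AND PROOFS =====

-- the value A's scan keeps after seeding with c and consuming xs
def scanMin (a c : Int) : List Int → Int
  | [] => c
  | x :: xs => if |x - a| < |c - a| then scanMin a x xs else scanMin a c xs

-- "c is what A's first-strict-minimum scan selects": member, minimal distance,
-- first-occurrence tie-break among equidistant values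
def IsNearest (old : List Int) (a c : Int) : Prop :=
  c ∈ old ∧ (∀ x ∈ old, |c - a| ≤ |x - a|) ∧
  ∀ u ∈ old, |u - a| = |c - a| → u ≠ c → old.idxOf c < old.idxOf u

-- the element appended by A's loop body for one new center
def elemA (old : List Int) (eps a : Int) : Int :=
  match find_closest_value old a with
  | some closest => if closest ≠ 0 then (if |closest - a| < eps then closest else a) else a
  | none => a

-- the element appended by B's loop body for one new center
def elemB (old : List Int) (eps a : Int) : Int :=
  if (sortedKeys old).length = 0 then a
  else if |nearest (sortedKeys old) old a - a| < eps then nearest (sortedKeys old) old a else a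

def DAt (old : List Int) (eps a : Int) : Prop :=
  a ≠ 0 ∧ |a| < eps ∧ (0 : Int) ∈ old ∧ (∀ v ∈ old, |a| ≤ |v - a|) ∧
    (2 * a ∈ old → old.idxOf (0 : Int) < old.idxOf (2 * a))

lemma fcv_fold (a : Int) : ∀ (xs : List Int) (c : Int),
    xs.foldl
      (fun (st : Option Int × Option Int) num =>
        let distance := |num - a|
        match st.2 with
        | none => (some num, some distance)
        | some md => if distance < md then (some num, some distance) else st)
      (some c, some |c - a|)
    = (some (scanMin a c xs), some |scanMin a c xs - a|) := by
  intro xs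
  induction xs with
  | nil => intro c; simp [scanMin]
  | cons x xs ih =>
    intro c
    simp only [List.foldl_cons, scanMin]
    by_cases h : |x - a| < |c - a| <;> simp [h, ih]

lemma fcv_cons (x : Int) (xs : List Int) (a : Int) :
    find_closest_value (x :: xs) a = some (scanMin a x xs) := by
  simp [find_closest_value, fcv_fold]

lemma scanMin_dist_le (a : Int) : ∀ (xs : List Int) (c : Int),
    |scanMin a c xs - a| ≤ |c - a| := by
  intro xs
  induction xs with
  | nil => intro c; simp [scanMin]
  | cons x xs ih =>
    intro c
    by_cases h : |x - a| < |c - a|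
    · simpa [scanMin, h] using le_of_lt (lt_of_le_of_lt (ih x) h)
    · simpa [scanMin, h] using ih c

lemma scanMin_split (a : Int) : ∀ (xs : List Int) (c : Int), ∃ p q,
    c :: xs = p ++ (scanMin a c xs) :: q ∧
    (∀ x ∈ p, |scanMin a c xs - a| < |x - a|) ∧
    (∀ x ∈ q, |scanMin a c xs - a| ≤ |x - a|) := by
  intro xs
  induction xs with
  | nil => intro c; exact ⟨[], [], by simp [scanMin]⟩
  | cons x xs ih =>
    intro c
    by_cases h : |x - a| < |c - a|
    · have hred : scanMin a c (x :: xs) = scanMin a x xs := by simp [scanMin, h]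
      rw [hred]
      obtain ⟨p, q, he, hp, hq⟩ := ih x
      refine ⟨c :: p, q, by rw [List.cons_append, ← he], ?_, hq⟩
      intro y hy
      rcases List.mem_cons.mp hy with rfl | hy
      · exact lt_of_le_of_lt (scanMin_dist_le a xs x) h
      · exact hp y hy
    · have hred : scanMin a c (x :: xs) = scanMin a c xs := by simp [scanMin, h]
      rw [hred]
      obtain ⟨p, q, he, hp, hq⟩ := ih c
      cases p with
      | nil =>
        simp only [List.nil_append, List.cons.injEq] at he
        obtain ⟨hc, hxq⟩ := he
        subst hxq
        refine ⟨[], x :: xs, by rw [← hc]; rfl, by simp, ?_⟩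
        intro y hy
        rcases List.mem_cons.mp hy with rfl | hy
        · rw [← hc]; exact le_of_not_gt h
        · exact hq y hy
      | cons d p' =>
        simp only [List.cons_append, List.cons.injEq] at he
        obtain ⟨hd, hxs⟩ := he
        refine ⟨c :: x :: p', q, by rw [List.cons_append, List.cons_append, ← hxs], ?_, hq⟩
        have hcs : |scanMin a c xs - a| < |c - a| := by
          have := hp d (by simp); rw [← hd] at this; exact this
        intro y hy
        rcases List.mem_cons.mp hy with rfl | hy
        · exact hcs
        rcases List.mem_cons.mp hy with rfl | hy
        · exact lt_of_lt_of_le hcs (le_of_not_gt h)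
        · exact hp y (by simp [hy])

lemma idxOf_append_self {p q : List Int} {c : Int} (h : c ∉ p) :
    (p ++ c :: q).idxOf c = p.length := by
  induction p with
  | nil => simp [List.idxOf_cons_self]
  | cons d p ih =>
    have hdc : d ≠ c := by intro he; exact h (by simp [he])
    rw [List.cons_append, List.idxOf_cons_ne _ (by simpa using hdc), ih (fun hc => h (by simp [hc]))]
    rfl

lemma idxOf_append_gt {p q : List Int} {c u : Int} (h : u ∉ p) (hne : u ≠ c) :
    p.length < (p ++ c :: q).idxOf u := by
  induction p with
  | nil =>
    simp only [List.nil_append, List.length_nil]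
    rw [List.idxOf_cons_ne _ (by simpa using (Ne.symm hne))]
    omega
  | cons d p ih =>
    have hdu : d ≠ u := by intro he; exact h (by simp [he])
    rw [List.cons_append, List.idxOf_cons_ne _ (by simpa using hdu)]
    have := ih (fun hc => h (by simp [hc]))
    simp only [List.length_cons]
    omega

lemma split_isNearest {old p q : List Int} {a c : Int}
    (he : old = p ++ c :: q)
    (hp : ∀ x ∈ p, |c - a| < |x - a|)
    (hq : ∀ x ∈ q, |c - a| ≤ |x - a|) : IsNearest old a c := by
  subst he
  have hcp : c ∉ p := fun hc => lt_irrefl _ (hp c hc)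
  refine ⟨List.mem_append_right _ (List.mem_cons_self ..), ?_, ?_⟩
  · intro x hx
    rcases List.mem_append.mp hx with hx | hx
    · exact le_of_lt (hp x hx)
    · rcases List.mem_cons.mp hx with rfl | hx
      · exact le_refl _
      · exact hq x hx
  · intro u hu htie hne
    have hup : u ∉ p := fun hc => by
      have := hp u hc; omega
    calc (p ++ c :: q).idxOf c = p.length := idxOf_append_self hcp
      _ < (p ++ c :: q).idxOf u := idxOf_append_gt hup hne

lemma fcv_isNearest {old : List Int} (a : Int) (h : old ≠ []) :
    ∃ c, find_closest_value old a = some c ∧ IsNearest old a c := by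
  cases old with
  | nil => exact absurd rfl h
  | cons y ys =>
    obtain ⟨p, q, he, hp, hq⟩ := scanMin_split a ys y
    exact ⟨scanMin a y ys, fcv_cons y ys a, split_isNearest he hp hq⟩

lemma nearest_unique {old : List Int} {a c₁ c₂ : Int}
    (h₁ : IsNearest old a c₁) (h₂ : IsNearest old a c₂) : c₁ = c₂ := by
  by_contra hne
  have htie : |c₂ - a| = |c₁ - a| :=
    le_antisymm (h₂.2.1 c₁ h₁.1) (h₁.2.1 c₂ h₂.1)
  have h12 := h₁.2.2 c₂ h₂.1 htie (Ne.symm hne)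
  have h21 := h₂.2.2 c₁ h₁.1 htie.symm hne
  omega

lemma pairwise_getElem_mono {keys : List Int} (hs : keys.Pairwise (· ≤ ·))
    {i j : Nat} (hj : j < keys.length) (hij : i ≤ j) :
    keys[i]'(lt_of_le_of_lt hij hj) ≤ keys[j] := by
  rcases Nat.lt_or_ge i j with h | h
  · exact List.pairwise_iff_getElem.mp hs i j _ hj h
  · have : i = j := le_antisymm hij h
    subst this; exact le_refl _

lemma bsearchGo_spec {keys : List Int} (hs : keys.Pairwise (· ≤ ·)) (a : Int) :
    ∀ (fuel lo hi : Nat), hi - lo ≤ fuel → lo ≤ hi → hi ≤ keys.length →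
      lo ≤ bsearchGo keys a fuel lo hi ∧ bsearchGo keys a fuel lo hi ≤ hi ∧
      (∀ i (hi' : i < keys.length), lo ≤ i → i < bsearchGo keys a fuel lo hi → keys[i] < a) ∧
      (∀ i (hi' : i < keys.length), bsearchGo keys a fuel lo hi ≤ i → i < hi → a ≤ keys[i]) := by
  intro fuel
  induction fuel with
  | zero =>
    intro lo hi hf hlh hhl
    have : lo = hi := by omega
    subst this
    simp only [bsearchGo]
    exact ⟨le_refl _, le_refl _, fun i _ h1 h2 => absurd (lt_of_le_of_lt h1 h2) (lt_irrefl _),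
      fun i _ h1 h2 => absurd (lt_of_le_of_lt h1 h2) (lt_irrefl _)⟩
  | succ n ih =>
    intro lo hi hf hlh hhl
    by_cases hlt : lo < hi
    · have hmid1 : lo ≤ (lo + hi) / 2 := by omega
      have hmid2 : (lo + hi) / 2 < hi := by omega
      have hmidlen : (lo + hi) / 2 < keys.length := lt_of_lt_of_le hmid2 hhl
      have hgetD : keys.getD ((lo + hi) / 2) 0 = keys[(lo + hi) / 2] :=
        List.getD_eq_getElem keys 0 hmidlen
      by_cases hcmp : keys.getD ((lo + hi) / 2) 0 < a
      · have hred : bsearchGo keys a (n + 1) lo hi = bsearchGo keys a n ((lo + hi) / 2 + 1) hi := by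
          rw [bsearchGo, if_pos hlt]; exact if_pos hcmp
        rw [hred]
        obtain ⟨h1, h2, h3, h4⟩ := ih ((lo + hi) / 2 + 1) hi (by omega) (by omega) hhl
        refine ⟨by omega, h2, ?_, fun i hi' hri hih => h4 i hi' hri hih⟩
        intro i hi' hloi hir
        rcases Nat.lt_or_ge ((lo + hi) / 2) i with h | h
        · exact h3 i hi' (by omega) hir
        · calc keys[i] ≤ keys[(lo + hi) / 2] := pairwise_getElem_mono hs hmidlen h
            _ < a := by rw [← hgetD]; exact hcmp
      · have hred : bsearchGo keys a (n + 1) lo hi = bsearchGo keys a n lo ((lo + hi) / 2) := by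
          rw [bsearchGo, if_pos hlt]; exact if_neg hcmp
        rw [hred]
        obtain ⟨h1, h2, h3, h4⟩ := ih lo ((lo + hi) / 2) (by omega) (by omega) (by omega)
        refine ⟨h1, by omega, fun i hi' hloi hir => h3 i hi' hloi hir, ?_⟩
        intro i hi' hri hih
        rcases Nat.lt_or_ge i ((lo + hi) / 2) with h | h
        · exact h4 i hi' hri h
        · calc a ≤ keys[(lo + hi) / 2] := by rw [← hgetD]; exact le_of_not_gt hcmp
            _ ≤ keys[i] := pairwise_getElem_mono hs hi' h
    · have : lo = hi := by omega
      subst this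
      simp only [bsearchGo, lt_irrefl, if_false]
      exact ⟨le_refl _, le_refl _, fun i _ h1 h2 => absurd (lt_of_le_of_lt h1 h2) (lt_irrefl _),
        fun i _ h1 h2 => absurd (lt_of_le_of_lt h1 h2) (lt_irrefl _)⟩

lemma index?_getD_eq_idxOf (old : List Int) (v : Int) (h : v ∈ old) :
    (PySem.List.index? old v).getD 0 = old.idxOf v := by
  rw [PySem.List.index?_eq_idxOf?]
  have hsome : (List.idxOf? v old).isSome := by
    rw [List.isSome_idxOf?]; exact h
  obtain ⟨i, hi⟩ := Option.isSome_iff_exists.mp hsome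
  rw [List.idxOf_eq_getD_idxOf?, hi]
  rfl

lemma isNearest_of_unique_min {old : List Int} {a c : Int} (hc : c ∈ old)
    (hmin : ∀ x ∈ old, |c - a| < |x - a| ∨ x = c) : IsNearest old a c := by
  refine ⟨hc, fun x hx => ?_, fun u hu htie hne => ?_⟩
  · rcases hmin x hx with h | rfl
    · exact le_of_lt h
    · exact le_refl _
  · rcases hmin u hu with h | rfl
    · omega
    · exact absurd rfl hne

lemma nearest_isNearest_of {keys old : List Int} (a : Int)
    (hmem : ∀ x : Int, x ∈ keys ↔ x ∈ old)
    (hstrict : keys.Pairwise (· < ·)) (hne : keys ≠ []) :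
    IsNearest old a (nearest keys old a) := by
  have hle : keys.Pairwise (· ≤ ·) := hstrict.imp le_of_lt
  have hn0 : 0 < keys.length := List.length_pos_of_ne_nil hne
  have smono : ∀ i j (hj : j < keys.length) (hij : i < j),
      keys[i]'(by omega) < keys[j] := fun i j hj hij =>
    List.pairwise_iff_getElem.mp hstrict i j (by omega) hj hij
  obtain ⟨h1, h2, h3, h4⟩ :=
    bsearchGo_spec hle a (keys.length - 0) 0 keys.length (by omega) (by omega) (le_refl _)
  set lo := bsearchGo keys a (keys.length - 0) 0 keys.length with hlo
  have hnear : nearest keys old a =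
      (if lo = 0 then keys.getD 0 0
       else if lo = keys.length then keys.getD (keys.length - 1) 0
       else
         if a - keys.getD (lo - 1) 0 < keys.getD lo 0 - a then keys.getD (lo - 1) 0
         else if keys.getD lo 0 - a < a - keys.getD (lo - 1) 0 then keys.getD lo 0
         else
           if (PySem.List.index? old (keys.getD (lo - 1) 0)).getD 0 <
              (PySem.List.index? old (keys.getD lo 0)).getD 0
           then keys.getD (lo - 1) 0 else keys.getD lo 0) := rfl
  have hx2j : ∀ x ∈ old, ∃ j, ∃ hj : j < keys.length, keys[j] = x := by
    intro x hx
    exact List.mem_iff_getElem.mp ((hmem x).mpr hx)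
  by_cases hl0 : lo = 0
  · have hc : nearest keys old a = keys[0] := by
      rw [hnear, if_pos hl0, List.getD_eq_getElem keys 0 hn0]
    rw [hc]
    have hga : ∀ j (hj : j < keys.length), a ≤ keys[j] := fun j hj =>
      h4 j hj (by omega) hj
    refine isNearest_of_unique_min ((hmem _).mp (List.getElem_mem hn0)) ?_
    intro x hx
    obtain ⟨j, hj, rfl⟩ := hx2j x hx
    rcases Nat.eq_zero_or_pos j with rfl | hjpos
    · exact Or.inr rfl
    · left
      have hlt := smono 0 j hj hjpos
      have e1 := hga 0 hn0
      have e2 := hga j hj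
      rcases abs_cases (keys[0] - a) with ⟨f1, f2⟩ | ⟨f1, f2⟩ <;>
        rcases abs_cases (keys[j] - a) with ⟨g1, g2⟩ | ⟨g1, g2⟩ <;> omega
  · by_cases hln : lo = keys.length
    · have hc : nearest keys old a = keys[keys.length - 1]'(by omega) := by
        rw [hnear, if_neg hl0, if_pos hln, List.getD_eq_getElem keys 0 (by omega)]
      rw [hc]
      have hga : ∀ j (hj : j < keys.length), keys[j] < a := fun j hj =>
        h3 j hj (by omega) (by omega)
      refine isNearest_of_unique_min ((hmem _).mp (List.getElem_mem (by omega))) ?_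
      intro x hx
      obtain ⟨j, hj, rfl⟩ := hx2j x hx
      rcases Nat.lt_or_ge j (keys.length - 1) with hjlt | hjge
      · left
        have hlt := smono j (keys.length - 1) (by omega) hjlt
        have e1 := hga (keys.length - 1) (by omega)
        have e2 := hga j hj
        rcases abs_cases (keys[keys.length - 1]'(by omega) - a) with ⟨f1, f2⟩ | ⟨f1, f2⟩ <;>
          rcases abs_cases (keys[j] - a) with ⟨g1, g2⟩ | ⟨g1, g2⟩ <;> omega
      · right
        congr 1
        omega
    · have hlo1 : lo - 1 < keys.length := by omega
      have hlon : lo < keys.length := by omega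
      have hv : keys.getD (lo - 1) 0 = keys[lo - 1] := List.getD_eq_getElem keys 0 hlo1
      have hu : keys.getD lo 0 = keys[lo] := List.getD_eq_getElem keys 0 hlon
      set v := keys[lo - 1]'hlo1 with hvdef
      set u := keys[lo]'hlon with hudef
      have hva : v < a := h3 (lo - 1) hlo1 (by omega) (by omega)
      have hau : a ≤ u := h4 lo hlon (by omega) (by omega)
      have hvu : v < u := smono (lo - 1) lo hlon (by omega)
      have hvmem : v ∈ old := (hmem v).mp (List.getElem_mem hlo1)
      have humem : u ∈ old := (hmem u).mp (List.getElem_mem hlon)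
      have hleft : ∀ j (hj : j < keys.length), j < lo → |keys[j] - a| = a - keys[j] ∧
          a - v ≤ a - keys[j] ∧ (j ≠ lo - 1 → a - v < a - keys[j]) := by
        intro j hj hjlo
        have hja : keys[j] < a := h3 j hj (by omega) hjlo
        have : keys[j] ≤ v := by
          rcases Nat.lt_or_ge j (lo - 1) with h | h
          · exact le_of_lt (smono j (lo - 1) hlo1 h)
          · have : j = lo - 1 := by omega
            subst this; exact le_refl _
        have hjs : j ≠ lo - 1 → keys[j] < v := fun hne =>
          smono j (lo - 1) hlo1 (by omega)
        constructor
        · rcases abs_cases (keys[j] - a) with ⟨f1, _⟩ | ⟨f1, _⟩ <;> omega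
        · constructor
          · omega
          · intro hne; have := hjs hne; omega
      have hright : ∀ j (hj : j < keys.length), lo ≤ j → |keys[j] - a| = keys[j] - a ∧
          u - a ≤ keys[j] - a ∧ (j ≠ lo → u - a < keys[j] - a) := by
        intro j hj hjlo
        have hja : a ≤ keys[j] := h4 j hj hjlo hj
        have : u ≤ keys[j] := by
          rcases Nat.lt_or_ge lo j with h | h
          · exact le_of_lt (smono lo j hj h)
          · have : j = lo := by omega
            subst this; exact le_refl _
        have hjs : j ≠ lo → u < keys[j] := fun hne => smono lo j hj (by omega)
        constructor
        · rcases abs_cases (keys[j] - a) with ⟨f1, _⟩ | ⟨f1, _⟩ <;> omega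
        · constructor
          · omega
          · intro hne; have := hjs hne; omega
      have hdv : |v - a| = a - v := by
        rcases abs_cases (v - a) with ⟨f1, _⟩ | ⟨f1, _⟩ <;> omega
      have hdu : |u - a| = u - a := by
        rcases abs_cases (u - a) with ⟨f1, _⟩ | ⟨f1, _⟩ <;> omega
      by_cases hc1 : a - v < u - a
      · have hc : nearest keys old a = v := by
          rw [hnear, if_neg hl0, if_neg hln, hv, hu, if_pos hc1]
        rw [hc]
        refine isNearest_of_unique_min hvmem ?_
        intro x hx
        obtain ⟨j, hj, rfl⟩ := hx2j x hx
        by_cases hjv : j = lo - 1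
        · subst hjv; exact Or.inr rfl
        · left
          rcases Nat.lt_or_ge j lo with h | h
          · obtain ⟨e1, _, e3⟩ := hleft j hj h
            omega
          · obtain ⟨e1, e2, _⟩ := hright j hj h
            omega
      · by_cases hc2 : u - a < a - v
        · have hc : nearest keys old a = u := by
            rw [hnear, if_neg hl0, if_neg hln, hv, hu, if_neg hc1, if_pos hc2]
          rw [hc]
          refine isNearest_of_unique_min humem ?_
          intro x hx
          obtain ⟨j, hj, rfl⟩ := hx2j x hx
          by_cases hju : j = lo
          · subst hju; exact Or.inr rfl
          · left
            rcases Nat.lt_or_ge j lo with h | h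
            · obtain ⟨e1, e2, _⟩ := hleft j hj h
              omega
            · obtain ⟨e1, _, e3⟩ := hright j hj (by omega)
              omega
        · have htie : a - v = u - a := by omega
          have hvu_ne : v ≠ u := ne_of_lt hvu
          have hidxne : old.idxOf v ≠ old.idxOf u := by
            intro he
            have hv' : old[old.idxOf v]'(List.idxOf_lt_length_of_mem hvmem) = v :=
              List.getElem_idxOf (List.idxOf_lt_length_of_mem hvmem)
            have hu' : old[old.idxOf u]'(List.idxOf_lt_length_of_mem humem) = u :=
              List.getElem_idxOf (List.idxOf_lt_length_of_mem humem)
            apply hvu_ne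
            rw [← hv', ← hu']
            congr 1
          have honly : ∀ x ∈ old, |x - a| = a - v → x = v ∨ x = u := by
            intro x hx hdist
            obtain ⟨j, hj, rfl⟩ := hx2j x hx
            rcases Nat.lt_or_ge j lo with h | h
            · obtain ⟨e1, _, e3⟩ := hleft j hj h
              by_cases hjv : j = lo - 1
              · subst hjv; exact Or.inl rfl
              · have := e3 hjv; omega
            · obtain ⟨e1, _, e3⟩ := hright j hj h
              by_cases hju : j = lo
              · subst hju; exact Or.inr rfl
              · have := e3 hju; omega
          have hminboth : ∀ x ∈ old, a - v ≤ |x - a| := by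
            intro x hx
            obtain ⟨j, hj, rfl⟩ := hx2j x hx
            rcases Nat.lt_or_ge j lo with h | h
            · obtain ⟨e1, e2, _⟩ := hleft j hj h
              omega
            · obtain ⟨e1, e2, _⟩ := hright j hj h
              omega
          rw [hnear, if_neg hl0, if_neg hln, hv, hu, if_neg hc1, if_neg hc2,
            index?_getD_eq_idxOf old v hvmem, index?_getD_eq_idxOf old u humem]
          by_cases hidx : old.idxOf v < old.idxOf u
          · rw [if_pos hidx]
            refine ⟨hvmem, ?_, ?_⟩
            · intro x hx; rw [hdv]; exact hminboth x hx
            · intro w hw htw hwne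
              rcases honly w hw (by omega) with rfl | rfl
              · exact absurd rfl hwne
              · exact hidx
          · rw [if_neg hidx]
            refine ⟨humem, ?_, ?_⟩
            · intro x hx; rw [hdu]; have := hminboth x hx; omega
            · intro w hw htw hwne
              rcases honly w hw (by omega) with rfl | rfl
              · omega
              · exact absurd rfl hwne

lemma mem_sortedKeys (old : List Int) (x : Int) : x ∈ sortedKeys old ↔ x ∈ old := by
  unfold sortedKeys
  rw [PySem.List.mem_sorted, PySem.Set.mem_ofList]

lemma sortedKeys_ne_nil {old : List Int} (h : old ≠ []) : sortedKeys old ≠ [] := by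
  obtain ⟨y, hy⟩ := List.exists_mem_of_ne_nil old h
  exact List.ne_nil_of_mem ((mem_sortedKeys old y).mpr hy)

lemma nearest_isNearest {old : List Int} (a : Int) (h : old ≠ []) :
    IsNearest old a (nearest (sortedKeys old) old a) :=
  nearest_isNearest_of a (mem_sortedKeys old) (PySem.List.sorted_ofList_pairwise_lt old)
    (sortedKeys_ne_nil h)

lemma fcv_eq_nearest {old : List Int} (a : Int) (h : old ≠ []) :
    find_closest_value old a = some (nearest (sortedKeys old) old a) := by
  obtain ⟨c, hc, hcn⟩ := fcv_isNearest a h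
  rw [hc, nearest_unique hcn (nearest_isNearest a h)]

lemma dAt_isNearest_zero {old : List Int} {eps a : Int} (h : DAt old eps a) :
    IsNearest old a 0 := by
  obtain ⟨ha, heps, hmem, hmin, hidx⟩ := h
  refine ⟨hmem, ?_, ?_⟩
  · intro x hx
    have : |(0 : Int) - a| = |a| := by
      rcases abs_cases a with ⟨f1, _⟩ | ⟨f1, _⟩ <;>
        rcases abs_cases ((0 : Int) - a) with ⟨g1, _⟩ | ⟨g1, _⟩ <;> omega
    rw [this]; exact hmin x hx
  · intro u hu htie hune
    have hu2a : u = 2 * a := by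
      have h1 := hmin u hu
      rcases abs_cases a with ⟨f1, _⟩ | ⟨f1, _⟩ <;>
        rcases abs_cases (u - a) with ⟨g1, _⟩ | ⟨g1, _⟩ <;>
        rcases abs_cases ((0 : Int) - a) with ⟨e1, _⟩ | ⟨e1, _⟩ <;> omega
    subst hu2a
    exact hidx hu

lemma isNearest_zero_dAt {old : List Int} {eps a : Int} (ha : a ≠ 0) (heps : |a| < eps)
    (h : IsNearest old a 0) : DAt old eps a := by
  obtain ⟨hmem, hmin, htie⟩ := h
  have habs : |(0 : Int) - a| = |a| := by
    rcases abs_cases a with ⟨f1, _⟩ | ⟨f1, _⟩ <;>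
      rcases abs_cases ((0 : Int) - a) with ⟨g1, _⟩ | ⟨g1, _⟩ <;> omega
  refine ⟨ha, heps, hmem, fun v hv => habs ▸ hmin v hv, fun h2a => ?_⟩
  refine htie (2 * a) h2a ?_ (by omega)
  rw [habs]
  rcases abs_cases a with ⟨f1, _⟩ | ⟨f1, _⟩ <;>
    rcases abs_cases (2 * a - a) with ⟨g1, _⟩ | ⟨g1, _⟩ <;> omega

lemma elem_eq_of_not_dAt {old : List Int} {eps a : Int} (h : ¬ DAt old eps a) :
    elemA old eps a = elemB old eps a := by
  cases old with
  | nil => rfl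
  | cons y ys =>
    have hne : (y :: ys : List Int) ≠ [] := by simp
    have hkne : sortedKeys (y :: ys) ≠ [] := sortedKeys_ne_nil hne
    have hklen : (sortedKeys (y :: ys)).length ≠ 0 := fun h0 => hkne (List.eq_nil_of_length_eq_zero h0)
    set c := nearest (sortedKeys (y :: ys)) (y :: ys) a with hcdef
    have hA : elemA (y :: ys) eps a =
        if c ≠ 0 then (if |c - a| < eps then c else a) else a := by
      unfold elemA
      rw [fcv_eq_nearest a hne]
    have hB : elemB (y :: ys) eps a = if |c - a| < eps then c else a := by
      unfold elemB
      rw [if_neg hklen]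
    rw [hA, hB]
    by_cases hc0 : c = 0
    · rw [hc0, if_neg (by simp)]
      have habs : |(0 : Int) - a| = |a| := by
        rcases abs_cases a with ⟨f1, _⟩ | ⟨f1, _⟩ <;>
          rcases abs_cases ((0 : Int) - a) with ⟨g1, _⟩ | ⟨g1, _⟩ <;> omega
      rw [habs]
      by_cases heps : |a| < eps
      · by_cases ha0 : a = 0
        · rw [if_pos heps, ha0]
        · exact absurd (isNearest_zero_dAt ha0 heps (hc0 ▸ nearest_isNearest a hne)) h
      · rw [if_neg heps]
    · rw [if_pos hc0]

lemma elem_of_dAt {old : List Int} {eps a : Int} (h : DAt old eps a) :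
    elemA old eps a = a ∧ elemB old eps a = 0 := by
  have hne : old ≠ [] := List.ne_nil_of_mem h.2.2.1
  have hkne := sortedKeys_ne_nil hne
  have hklen : (sortedKeys old).length ≠ 0 := fun h0 => hkne (List.eq_nil_of_length_eq_zero h0)
  have hc0 : nearest (sortedKeys old) old a = 0 :=
    nearest_unique (nearest_isNearest a hne) (dAt_isNearest_zero h)
  have habs : |(0 : Int) - a| = |a| := by
    rcases abs_cases a with ⟨f1, _⟩ | ⟨f1, _⟩ <;>
      rcases abs_cases ((0 : Int) - a) with ⟨g1, _⟩ | ⟨g1, _⟩ <;> omega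
  constructor
  · unfold elemA
    rw [fcv_eq_nearest a hne, hc0]
    simp
  · unfold elemB
    rw [if_neg hklen, hc0, habs, if_pos h.2.1]

lemma A_eq_map (full_centers new_centers : List Int) (epsilon : Int) :
    new_section_centers_generator full_centers new_centers epsilon
      = new_centers.map (elemA (full_centers.drop new_centers.length) epsilon) := by
  simp only [new_section_centers_generator, PySem.List.slice_from_natCast]
  trans (List.foldl
    (fun acc x => acc ++ [elemA (full_centers.drop new_centers.length) epsilon x]) [] new_centers)
  · refine PySem.List.foldl_congr_mem _ _ _ _ (fun acc x _ => ?_)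
    unfold elemA
    cases hf : find_closest_value (full_centers.drop new_centers.length) x with
    | none => rfl
    | some c => show (if c ≠ 0 then _ else _) = _ ++ [if c ≠ 0 then _ else _]; split_ifs <;> rfl
  · rw [PySem.List.foldl_append_singleton_eq_map, List.nil_append]

lemma B_eq_map (full_centers new_centers : List Int) (epsilon : Int) :
    new_section_centers_generator_alt full_centers new_centers epsilon
      = new_centers.map (elemB (full_centers.drop new_centers.length) epsilon) := by
  simp only [new_section_centers_generator_alt, PySem.List.slice_from_natCast]
  trans (List.foldl
    (fun acc x => acc ++ [elemB (full_centers.drop new_centers.length) epsilon x]) [] new_centers)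
  · refine PySem.List.foldl_congr_mem _ _ _ _ (fun acc x _ => ?_)
    unfold elemB
    split_ifs <;> rfl
  · rw [PySem.List.foldl_append_singleton_eq_map, List.nil_append]

-- ===== VERDICT (by name: the statement is the Claim_ definition above) =====
theorem new_section_centers_generator_spec : Claim_unchanged_new_section_centers_generator := by
  intro full new eps _hdom hnd
  rw [A_eq_map, B_eq_map]
  refine List.map_congr_left (fun a ha => ?_)
  refine elem_eq_of_not_dAt (fun hd => hnd ?_)
  exact ⟨a, ha, hd.1, hd.2.1, hd.2.2.1, hd.2.2.2.1, hd.2.2.2.2⟩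

theorem new_section_centers_generator_changed : Claim_changed_new_section_centers_generator := by
  unfold Claim_changed_new_section_centers_generator; decide

theorem new_section_centers_generator_tight : Claim_exact_new_section_centers_generator := by
  intro full new eps _hdom hd heq
  obtain ⟨a, ha, h1, h2, h3, h4, h5⟩ := hd
  rw [A_eq_map, B_eq_map] at heq
  have := (List.map_inj_left.mp heq) a ha
  obtain ⟨hA, hB⟩ := elem_of_dAt (old := full.drop new.length) (eps := eps) (a := a)
    ⟨h1, h2, h3, h4, h5⟩
  rw [hA, hB] at this
  exact h1 this
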